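-- pv_equiv track=rewrite | github.com/Myeonghan-Jeong/algorithm-programmers | stack_and_que/iron_sticks.py | solution
-- ===== SOURCE A (Python) =====
-- from collections import deque
--
-- def solution(arrangement):
--     answer = 0
--
--     sticks = deque()
--     for i in range(len(arrangement)):
--         if arrangement[i] == '(':
--             sticks.append(i)
--         else:
--             if i == sticks[-1] + 1:  # () means lazer
--                 sticks.pop()
--                 answer += len(sticks)  # cut left sticks
--             else:  # (....) means stick
--                 sticks.pop()
--                 answer += 1  # add left stick
--
--     return answer
-- ===== SOURCE B (Python) =====
-- def solution(arrangement):
--     # Staged closed-form computation: prefix balances (validating as we go),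
--     # laser pairs found by zipping adjacent characters, then a sum.
--     balances = []
--     bal = 0
--     for c in arrangement:
--         if c != '(' and bal == 0:
--             raise ValueError("unmatched closing piece in arrangement")
--         balances.append(bal)
--         bal += 1 if c == '(' else -1
--     laser_depths = [d for d, c1, c2 in zip(balances, arrangement, arrangement[1:])
--                     if c1 == '(' and c2 != '(']
--     stick_closes = sum(1 for c in arrangement if c != '(') - len(laser_depths)
--     return stick_closes + sum(laser_depths)
-- ===== Notes on version B (the rewrite author's own statement) =====
-- stated objective: alternative
-- what changed: Replaces A's stack-of-indices scan with a staged closed-form computation: a prefix-balance list (with explicit validation of unmatched closers, where A's deque pop raises), laser pairs found by zipping adjacent characters, and the answer as (stick closes) + sum of balances at laser opens; no stack and no per-close stack-top branching.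
import Mathlib
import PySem

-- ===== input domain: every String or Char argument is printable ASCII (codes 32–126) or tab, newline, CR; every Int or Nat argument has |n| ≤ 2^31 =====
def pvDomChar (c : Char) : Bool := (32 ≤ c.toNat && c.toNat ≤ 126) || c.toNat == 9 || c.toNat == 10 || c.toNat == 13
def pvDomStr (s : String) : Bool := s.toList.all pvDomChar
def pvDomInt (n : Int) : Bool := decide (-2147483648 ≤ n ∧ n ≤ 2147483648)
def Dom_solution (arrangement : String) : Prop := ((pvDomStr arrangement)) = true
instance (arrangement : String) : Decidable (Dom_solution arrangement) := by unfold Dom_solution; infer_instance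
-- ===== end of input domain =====

-- B replaces A's stack scan by a staged closed-form computation (prefix balances + laser
-- pairs + a sum); equivalence of RETURN values is proved on Pre_ (where A returns).

-- ===== PORT A =====
-- Loop of A over the characters, carrying the index i and the deque `sticks` of indices.
-- `sticks[-1]` on an empty deque raises IndexError in Python: modelled by `none`.
def solutionLoopA (chars : List Char) (i : Nat) (sticks : List Nat) (answer : Int) : Option Int :=
  match chars with
  | [] => some answer
  | c :: rest =>
    if c = '(' then
      solutionLoopA rest (i + 1) (sticks ++ [i]) answer
    else
      match sticks.getLast? with
      | none => none  -- IndexError: sticks[-1] on empty deque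
      | some t =>
        if i = t + 1 then
          solutionLoopA rest (i + 1) sticks.dropLast (answer + (sticks.dropLast.length : Int))
        else
          solutionLoopA rest (i + 1) sticks.dropLast (answer + 1)

def solution (arrangement : String) : Int :=
  (solutionLoopA arrangement.toList 0 [] 0).getD 0

-- ===== PORT B =====
-- First stage of B: the list of prefix balances (`balances` in Source B), built by the loop;
-- `none` models B's ValueError on an unmatched closing character.
def balancesB (chars : List Char) (bal : Int) : Option (List Int) :=
  match chars with
  | [] => some []
  | c :: rest =>
    if c ≠ '(' ∧ bal = 0 then none  -- ValueError: unmatched closing piece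
    else (balancesB rest (bal + (if c = '(' then 1 else -1))).map (bal :: ·)

-- Body of B on the character list (bal = 0 at the top call): laser depths from zipping
-- balances with adjacent character pairs, then the closed-form sum.
def stagedB (l : List Char) (bal : Int) : Int :=
  match balancesB l bal with
  | none => 0  -- unreachable under Pre_solution (Python B raised ValueError)
  | some balances =>
    let laserDepths := ((balances.zip (l.zip l.tail)).filter
        (fun p => p.2.1 == '(' && p.2.2 != '(')).map Prod.fst
    ((l.countP (fun c => !(c == '('))) : Int) - laserDepths.length + laserDepths.sum

def solution_alt (arrangement : String) : Int :=
  stagedB arrangement.toList 0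

-- ===== PRECONDITION & SPEC =====
-- Balance of a prefix: #'(' minus #(other characters).
def pvBal (l : List Char) : Int :=
  (l.countP (fun c => c == '(') : Int) - (l.countP (fun c => !(c == '(')) : Int)

-- Pre_ excludes exactly the inputs on which A raises IndexError: a non-'(' character
-- whose prefix has no surplus of open '('.
def Pre_solution (arrangement : String) : Prop :=
  ∀ i, (h : i < arrangement.toList.length) →
    arrangement.toList[i] ≠ '(' → 0 < pvBal (arrangement.toList.take i)

instance (arrangement : String) : Decidable (Pre_solution arrangement) := by
  unfold Pre_solution; infer_instance

def pvWitness_solution : String := "()(())"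

def Spec_solution (arrangement : String) (out : Int) : Prop := out = solution_alt arrangement
instance (arrangement : String) (out : Int) : Decidable (Spec_solution arrangement out) := by unfold Spec_solution; infer_instance

-- ===== CLAIM (what is proved, stated in full; the proofs are below) =====
def Claim_equal_solution : Prop := ∀ (arrangement : String), Dom_solution arrangement → Pre_solution arrangement → Spec_solution arrangement (solution arrangement)

-- ===== LEMMAS AND PROOFS =====

-- Recursive characterisation shared by both proofs: the pieces gained over a suffix,
-- given the current balance and whether the previous character was '('.
def gainR (chars : List Char) (bal : Int) (prevOpen : Bool) : Int :=
  match chars with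
  | [] => 0
  | c :: rest =>
    if c = '(' then gainR rest (bal + 1) true
    else (if prevOpen then bal - 1 else 1) + gainR rest (bal - 1) false

-- Pure (validation-free) counterparts of B's stages, used only in the proofs.
def balList (chars : List Char) (bal : Int) : List Int :=
  match chars with
  | [] => []
  | c :: rest => bal :: balList rest (bal + (if c = '(' then 1 else -1))

def stagedPure (l : List Char) (bal : Int) : Int :=
  let laserDepths := (((balList l bal).zip (l.zip l.tail)).filter
      (fun p => p.2.1 == '(' && p.2.2 != '(')).map Prod.fst
  ((l.countP (fun c => !(c == '('))) : Int) - laserDepths.length + laserDepths.sum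

lemma pvBal_append_single (p : List Char) (c : Char) :
    pvBal (p ++ [c]) = pvBal p + (if c = '(' then 1 else -1) := by
  simp [pvBal, List.countP_append, List.countP_singleton]
  split_ifs with h
  · simp; ring
  · simp; ring

-- Positivity of the running balance at every closer makes B's validation pass.
lemma pvBal_cons (c : Char) (l : List Char) :
    pvBal (c :: l) = (if c = '(' then 1 else -1) + pvBal l := by
  simp [pvBal, List.countP_cons]
  split_ifs with h
  · simp; ring
  · simp; ring

lemma balancesB_eq_balList :
    ∀ (l : List Char) (bal : Int),
    (∀ i, (h : i < l.length) → l[i] ≠ '(' → 0 < bal + pvBal (l.take i)) →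
    balancesB l bal = some (balList l bal) := by
  intro l
  induction l with
  | nil => intro bal _; simp [balancesB, balList]
  | cons c rest ih =>
    intro bal hpos
    have key : ∀ i, (h : i < rest.length) → rest[i] ≠ '(' →
        0 < (bal + (if c = '(' then 1 else -1)) + pvBal (rest.take i) := by
      intro i hi hne
      have h2 := hpos (i + 1) (by simpa using Nat.succ_lt_succ hi) (by simpa using hne)
      rw [List.take_succ_cons, pvBal_cons] at h2
      split_ifs at h2 ⊢ <;> omega
    by_cases hc : c = '('
    · rw [balancesB, balList, if_neg (by simp [hc]), ih _ key]
      simp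
    · have h0 : 0 < bal := by
        have := hpos 0 (by simp) (by simpa using hc)
        simpa [pvBal] using this
      rw [balancesB, balList, if_neg (by intro h; omega), ih _ key]
      simp

-- A-side: the stack loop returns answer + gainR, under the stack invariant.
lemma loopA_eq_gainR (full : List Char)
    (hPre : ∀ i, (h : i < full.length) → full[i] ≠ '(' → 0 < pvBal (full.take i)) :
    ∀ (chars p : List Char) (sticks : List Nat) (answer : Int) (prevOpen : Bool),
    full = p ++ chars →
    (∀ x ∈ sticks, x + 1 ≤ p.length) →
    (sticks.getLast? = some (p.length - 1) ∧ sticks ≠ [] ↔ prevOpen = true) →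
    ((sticks.length : Int) = pvBal p) →
    solutionLoopA chars p.length sticks answer
      = some (answer + gainR chars (sticks.length : Int) prevOpen) := by
  intro chars
  induction chars with
  | nil => intro p sticks answer prevOpen _ _ _ _; simp [solutionLoopA, gainR]
  | cons c rest ih =>
    intro p sticks answer prevOpen hfull hbound htop hcnt
    by_cases hc : c = '('
    · subst hc
      rw [solutionLoopA, gainR]
      have h1 : full = (p ++ ['(']) ++ rest := by simp [hfull]
      have := ih (p ++ ['(']) (sticks ++ [p.length]) answer true h1
        (by intro x hx; simp at hx; rcases hx with hx | hx
            · have := hbound x hx; simp; omega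
            · simp [hx])
        (by constructor
            · intro _; rfl
            · intro _; simp)
        (by simp [pvBal_append_single]; omega)
      simpa using this
    · have hidx : p.length < full.length := by simp [hfull]
      have hch : full[p.length] = c := by
        subst hfull; simp [List.getElem_append_right]
      have htake : full.take p.length = p := by subst hfull; simp
      have hpos : 0 < pvBal p := by
        have := hPre p.length hidx (by rw [hch]; exact hc)
        rwa [htake] at this
      have hne : sticks ≠ [] := by
        intro h; rw [h] at hcnt; simp at hcnt; omega
      obtain ⟨t, ht⟩ : ∃ t, sticks.getLast? = some t :=
        Option.isSome_iff_exists.mp (by simpa [List.getLast?_isSome] using hne)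
      rw [solutionLoopA, gainR]
      simp only [if_neg hc, ht]
      have hlenD : sticks.dropLast.length = sticks.length - 1 := (List.length_dropLast (xs := sticks))
      have hlen1 : 1 ≤ sticks.length := List.length_pos_iff.mpr hne
      have h1 : full = (p ++ [c]) ++ rest := by simp [hfull]
      have hboundD : ∀ x ∈ sticks.dropLast, x + 1 ≤ (p ++ [c]).length := by
        intro x hx
        have := hbound x (List.mem_of_mem_dropLast hx)
        simp; omega
      have htopD : (sticks.dropLast.getLast? = some ((p ++ [c]).length - 1) ∧ sticks.dropLast ≠ [] ↔ (false : Bool) = true) := by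
        constructor
        · rintro ⟨hg, hd⟩
          exfalso
          have hmem : (p ++ [c]).length - 1 ∈ sticks.dropLast := List.mem_of_getLast? hg
          have := hbound _ (List.mem_of_mem_dropLast hmem)
          simp at this
        · intro h; simp at h
      have hcntD : ((sticks.dropLast.length : Int) = pvBal (p ++ [c])) := by
        rw [pvBal_append_single, if_neg hc, hlenD]
        omega
      have hlen2 : ((sticks.dropLast.length : Int)) = (sticks.length : Int) - 1 := by
        rw [hlenD]; push_cast [hlen1]; ring
      by_cases hlz : p.length = t + 1
      · have hprev : prevOpen = true := htop.mp ⟨by rw [ht]; congr 1; omega, hne⟩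
        rw [if_pos hlz, hprev]
        have hrec := ih (p ++ [c]) sticks.dropLast (answer + (sticks.dropLast.length : Int)) false h1 hboundD htopD hcntD
        simp only [List.length_append, List.length_singleton] at hrec
        rw [hlen2] at hrec
        rw [hlen2, hrec]
        congr 1
        rw [if_pos rfl]
        ring
      · have hprev : prevOpen = false := by
          cases hpo : prevOpen
          · rfl
          · exfalso
            have := htop.mpr hpo
            rw [ht] at this
            have hb := hbound t (List.mem_of_getLast? ht)
            have : t = p.length - 1 := by exact Option.some_injective _ this.1
            omega
        rw [if_neg hlz, hprev]
        have hrec := ih (p ++ [c]) sticks.dropLast (answer + 1) false h1 hboundD htopD hcntD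
        simp only [List.length_append, List.length_singleton] at hrec
        rw [hlen2] at hrec
        rw [hrec]
        simp only [Bool.false_eq_true, if_false]
        congr 1
        ring

-- B-side recursion cases for stagedPure.
lemma stagedPure_nil (bal : Int) : stagedPure [] bal = 0 := by
  simp [stagedPure, balList]

lemma stagedPure_cons_open (rest : List Char) (bal : Int) :
    stagedPure ('(' :: rest) bal
      = stagedPure rest (bal + 1)
        + (match rest.head? with
           | some d => if d ≠ '(' then bal - 1 else 0
           | none => 0) := by
  cases rest with
  | nil => simp [stagedPure, balList]
  | cons d rest' =>
    by_cases hd : d = '('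
    · subst hd
      simp [stagedPure, balList]
    · simp [stagedPure, balList, hd]
      ring

lemma stagedPure_cons_close (c : Char) (hc : c ≠ '(') (rest : List Char) (bal : Int) :
    stagedPure (c :: rest) bal = 1 + stagedPure rest (bal - 1) := by
  cases rest with
  | nil => simp [stagedPure, balList, hc]
  | cons d rest' =>
    simp [stagedPure, balList, hc]
    ring_nf

-- gainR equals stagedPure up to the boundary adjustment for an external previous '('.
lemma gainR_eq_stagedPure :
    ∀ (l : List Char) (bal : Int) (prevOpen : Bool),
    gainR l bal prevOpen
      = stagedPure l bal
        + (match l with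
           | c :: _ => if prevOpen = true ∧ c ≠ '(' then bal - 2 else 0
           | [] => 0) := by
  intro l
  induction l with
  | nil => intro bal prevOpen; simp [gainR, stagedPure_nil]
  | cons c rest ih =>
    intro bal prevOpen
    by_cases hc : c = '('
    · subst hc
      rw [gainR, if_pos rfl, ih (bal + 1) true, stagedPure_cons_open]
      cases rest with
      | nil => simp
      | cons d rest' =>
        by_cases hd : d = '('
        · simp [hd]
        · simp [hd]
          ring
    · rw [gainR, if_neg hc, ih (bal - 1) false, stagedPure_cons_close c hc]
      cases rest with
      | nil =>
        cases prevOpen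
        · simp [hc]
        · simp [hc]; ring
      | cons d rest' =>
        cases prevOpen
        · simp [hc]
        · simp [hc]; ring

-- ===== VERDICT (by name: the statement is the Claim_ definition above) =====
theorem solution_spec : Claim_equal_solution := by
  intro s _ hPre
  unfold Spec_solution solution solution_alt
  have hA := loopA_eq_gainR s.toList hPre s.toList [] [] 0 false rfl (by simp) (by simp) (by simp [pvBal])
  simp only [List.length_nil] at hA
  rw [hA]
  simp only [Option.getD_some, Nat.cast_zero, zero_add]
  have hVal : balancesB s.toList 0 = some (balList s.toList 0) := by
    apply balancesB_eq_balList
    intro i hi hne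
    have := hPre i hi hne
    omega
  have hStaged : stagedB s.toList 0 = stagedPure s.toList 0 := by
    rw [stagedB, hVal]
    rfl
  rw [hStaged]
  have hB := gainR_eq_stagedPure s.toList 0 false
  cases hl : s.toList with
  | nil => rw [hl] at hB; simpa using hB
  | cons c rest => rw [hl] at hB; simpa using hB
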